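-- pv_equiv track=rewrite | github.com/Enio-Telles/sistema_monitoramento_2 | funcoes_tabelas/tabela_produtos/tabela_descricoes_v2.py | _moda_texto
-- ===== SOURCE A (Python) =====
-- def _moda_texto(lista: list[str] | None) -> str | None:
--     if not lista:
--         return None
--     limpos = [str(x).strip() for x in lista if x not in (None, "", []) and str(x).strip()]
--     if not limpos:
--         return None
--     from collections import Counter
--     cont = Counter(limpos)
--     maior = max(cont.values())
--     candidatos = sorted([k for k, v in cont.items() if v == maior])
--     return candidatos[0] if candidatos else None
-- ===== SOURCE B (Python) =====
-- def _moda_texto(lista):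
--     if not lista:
--         return None
--     limpos = [str(x).strip() for x in lista if x not in (None, "", []) and str(x).strip()]
--     if not limpos:
--         return None
--     s = sorted(limpos)
--     best_val = None
--     best_count = 0
--     run_val = s[0]
--     run_count = 0
--     for x in s:
--         if x == run_val:
--             run_count += 1
--         else:
--             if run_count > best_count:
--                 best_val, best_count = run_val, run_count
--             run_val, run_count = x, 1
--     if run_count > best_count:
--         best_val = run_val
--     return best_val
-- ===== Notes on version B (the rewrite author's own statement) =====
-- stated objective: alternative
-- what changed: B replaces Counter + max(values) + tied-key filtering + sorted()[0] by sorting the cleaned list once and scanning it in one pass counting consecutive runs, keeping the first (hence lexicographically smallest) run whose length strictly exceeds the best so far; no hash counting structure at all.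
import Mathlib
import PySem

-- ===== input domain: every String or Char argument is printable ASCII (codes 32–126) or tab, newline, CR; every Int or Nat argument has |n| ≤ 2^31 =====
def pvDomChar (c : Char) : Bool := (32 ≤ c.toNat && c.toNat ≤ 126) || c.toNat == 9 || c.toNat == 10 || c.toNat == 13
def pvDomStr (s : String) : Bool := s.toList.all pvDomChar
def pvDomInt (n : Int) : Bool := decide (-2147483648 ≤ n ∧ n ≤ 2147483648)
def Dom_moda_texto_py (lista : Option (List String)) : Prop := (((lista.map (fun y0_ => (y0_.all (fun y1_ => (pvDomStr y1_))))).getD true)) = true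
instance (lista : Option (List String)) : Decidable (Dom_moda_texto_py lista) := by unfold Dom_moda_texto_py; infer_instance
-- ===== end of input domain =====

-- B replaces Counter + max(values) + tied-key filter + sorted()[0] by sorting the cleaned
-- list once and scanning consecutive runs, keeping the first run strictly longer than the
-- best so far (objective: alternative, no counting structure at all).

-- ===== PORT A =====
-- limpos = [str(x).strip() for x in lista if x not in (None, "", []) and str(x).strip()]
-- (identical line in A and B, shared helper; for a str x, `x in (None, "", [])` ↔ x == "")
def pvLimpos (l : List String) : List String :=
  (l.filter (fun x => !(x == "") && !(PySem.Str.strip x == ""))).map PySem.Str.strip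

def moda_texto_py (lista : Option (List String)) : Option String :=
  match lista with
  | none => none
  | some l =>
    if l = [] then none
    else
      let limpos := pvLimpos l
      if limpos = [] then none
      else
        let cont := PySem.Dict.counter limpos
        match PySem.List.max? cont.values (fun v => v) with
        | none => none   -- unreachable: cont.values is nonempty
        | some maior =>
          match PySem.List.sorted ((cont.items.filter (fun p => p.2 == maior)).map (·.1)) (fun k => k) false with
          | [] => none
          | c :: _ => some c

-- ===== PORT B =====
-- loop body: run continues / run breaks (flush best if strictly longer) / start new run
def pvStep (st : Option String × Nat × String × Nat) (x : String) : Option String × Nat × String × Nat :=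
  if x == st.2.2.1 then (st.1, st.2.1, st.2.2.1, st.2.2.2 + 1)
  else if st.2.2.2 > st.2.1 then (some st.2.2.1, st.2.2.2, x, 1)
  else (st.1, st.2.1, x, 1)

-- final flush after the loop
def pvFlush (st : Option String × Nat × String × Nat) : Option String :=
  if st.2.2.2 > st.2.1 then some st.2.2.1 else st.1

def moda_texto_py_alt (lista : Option (List String)) : Option String :=
  match lista with
  | none => none
  | some l =>
    if l = [] then none
    else
      let limpos := pvLimpos l
      if limpos = [] then none
      else
        match PySem.List.sorted limpos (fun k => k) false with
        | [] => none   -- unreachable: limpos ≠ [] so s[0] exists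
        | s0 :: t => pvFlush ((s0 :: t).foldl pvStep (none, 0, s0, 0))

-- ===== PRECONDITION & SPEC =====
def Spec_moda_texto_py (lista : Option (List String)) (out : Option String) : Prop := out = moda_texto_py_alt lista
instance (lista : Option (List String)) (out : Option String) : Decidable (Spec_moda_texto_py lista out) := by unfold Spec_moda_texto_py; infer_instance

-- ===== CLAIM (what is proved, stated in full; the proofs are below) =====
def Claim_equal_moda_texto_py : Prop := ∀ (lista : Option (List String)), Dom_moda_texto_py lista → Spec_moda_texto_py lista (moda_texto_py lista)

-- ===== LEMMAS AND PROOFS =====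

-- Invariant of B's run-scan over a sorted tail S: with pending run (rv, rc) and best (b, bc),
-- the scan + final flush returns b if nothing in replicate rc rv ++ S beats bc, and returns
-- the (unique) smallest maximal-count element m whenever it beats bc.
theorem pv_scan (S : List String) :
    ∀ (b : Option String) (bc : Nat) (rv : String) (rc : Nat),
      S.Pairwise (· ≤ ·) → (∀ x ∈ S, rv ≤ x) →
      ((∀ y ∈ (List.replicate rc rv ++ S), (List.replicate rc rv ++ S).count y ≤ bc) →
        pvFlush (S.foldl pvStep (b, bc, rv, rc)) = b) ∧
      (∀ m ∈ (List.replicate rc rv ++ S),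
        bc < (List.replicate rc rv ++ S).count m →
        (∀ y ∈ (List.replicate rc rv ++ S),
          (List.replicate rc rv ++ S).count y ≤ (List.replicate rc rv ++ S).count m) →
        (∀ y ∈ (List.replicate rc rv ++ S),
          (List.replicate rc rv ++ S).count y = (List.replicate rc rv ++ S).count m → m ≤ y) →
        pvFlush (S.foldl pvStep (b, bc, rv, rc)) = some m) := by
  induction S with
  | nil =>
      intro b bc rv rc _ _
      constructor
      · intro H
        simp only [List.foldl_nil, pvFlush]
        rw [if_neg]
        intro hgt
        have hrc : rc ≠ 0 := by omega
        have hmem : rv ∈ List.replicate rc rv ++ ([] : List String) := by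
          simp [List.mem_replicate, hrc]
        have := H rv hmem
        simp [List.count_replicate_self] at this
        omega
      · intro m hm hgt _ _
        have hmrv : m = rv := List.eq_of_mem_replicate (by simpa using hm)
        have hcnt : (List.replicate rc rv ++ ([] : List String)).count m = rc := by
          simp [hmrv, List.count_replicate_self]
        rw [hcnt] at hgt
        simp only [List.foldl_nil, pvFlush]
        rw [if_pos (by omega)]
        simp [hmrv]
  | cons x S' ih =>
      intro b bc rv rc hpw hge
      have hpw' : S'.Pairwise (· ≤ ·) := (List.pairwise_cons.1 hpw).2
      have hxS' : ∀ y ∈ S', x ≤ y := (List.pairwise_cons.1 hpw).1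
      by_cases hx : x = rv
      · -- run continues
        subst hx
        have hM : List.replicate rc x ++ x :: S' = List.replicate (rc + 1) x ++ S' := by
          rw [List.replicate_succ', List.append_assoc]; rfl
        have hstep : pvStep (b, bc, x, rc) x = (b, bc, x, rc + 1) := by
          simp [pvStep]
        obtain ⟨ih1, ih2⟩ := ih b bc x (rc + 1) hpw' hxS'
        constructor
        · intro H
          rw [hM] at H
          simp only [List.foldl_cons, hstep]
          exact ih1 H
        · intro m hm hgt hmax htie
          rw [hM] at hm hgt hmax htie
          simp only [List.foldl_cons, hstep]
          exact ih2 m hm hgt hmax htie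
      · -- run breaks
        have hrvx : rv < x := lt_of_le_of_ne (hge x List.mem_cons_self) (fun h => hx h.symm)
        have hrvnot : ∀ y ∈ x :: S', rv < y := by
          intro y hy
          rcases List.mem_cons.1 hy with h | h
          · exact h ▸ hrvx
          · exact lt_of_lt_of_le hrvx (hxS' y h)
        have hcount : ∀ y, y ≠ rv →
            (List.replicate rc rv ++ x :: S').count y = (x :: S').count y := by
          intro y hy
          simp [List.count_append, List.count_replicate, Ne.symm hy]
        have hcountrv : (List.replicate rc rv ++ x :: S').count rv = rc := by
          rw [List.count_append, List.count_replicate_self]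
          have : rv ∉ x :: S' := fun h => lt_irrefl rv (hrvnot rv h)
          simp [List.count_eq_zero_of_not_mem this]
        have hstep : pvStep (b, bc, rv, rc) x =
            (if rc > bc then ((some rv, rc, x, 1) : Option String × Nat × String × Nat)
             else (b, bc, x, 1)) := by
          simp only [pvStep]
          rw [if_neg (by simpa using hx)]
        have hM1 : (List.replicate 1 x ++ S' : List String) = x :: S' := by simp
        by_cases hrcbc : rc > bc
        · -- flush: best becomes (rv, rc)
          obtain ⟨ih1, ih2⟩ := ih (some rv) rc x 1 hpw' hxS'
          rw [hM1] at ih1 ih2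
          constructor
          · intro H
            exfalso
            have hrcne : rc ≠ 0 := by omega
            have hmem : rv ∈ List.replicate rc rv ++ x :: S' := by
              simp [List.mem_replicate, hrcne]
            have := H rv hmem
            rw [hcountrv] at this
            omega
          · intro m hm hgt hmax htie
            simp only [List.foldl_cons, hstep, if_pos hrcbc]
            by_cases hmrv : m = rv
            · -- the pending run itself is the answer; nothing later ever beats it strictly
              rw [hmrv] at hgt hmax htie ⊢
              rw [hcountrv] at hgt hmax htie
              apply ih1
              intro y hy
              have hylt : rv < y := hrvnot y hy
              have hyM : y ∈ List.replicate rc rv ++ x :: S' := by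
                simp [hy]
              have h1 := hmax y hyM
              rw [hcount y (fun h => lt_irrefl rv (h ▸ hylt))] at h1
              exact h1
            · -- the answer lies in the strictly larger tail
              have hmtail : m ∈ x :: S' := by
                rcases List.mem_append.1 hm with h | h
                · exact absurd (List.eq_of_mem_replicate h) hmrv
                · exact h
              have hmc : (List.replicate rc rv ++ x :: S').count m = (x :: S').count m :=
                hcount m hmrv
              apply ih2 m hmtail
              · rw [← hmc]
                have h1 : rc ≤ (List.replicate rc rv ++ x :: S').count m := by
                  have hrcne : rc ≠ 0 := by omega
                  have hmemrv : rv ∈ List.replicate rc rv ++ x :: S' := by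
                    simp [List.mem_replicate, hrcne]
                  have := hmax rv hmemrv
                  rwa [hcountrv] at this
                rcases lt_or_eq_of_le h1 with h | h
                · exact h
                · exfalso
                  have hrcne : rc ≠ 0 := by omega
                  have hmemrv : rv ∈ List.replicate rc rv ++ x :: S' := by
                    simp [List.mem_replicate, hrcne]
                  have := htie rv hmemrv (by rw [hcountrv]; exact h)
                  exact absurd (hrvnot m hmtail) (not_lt.2 this)
              · intro y hy
                have hyM : y ∈ List.replicate rc rv ++ x :: S' := by simp [hy]
                have hylt : rv < y := hrvnot y hy
                have := hmax y hyM
                rwa [hcount y (fun h => lt_irrefl rv (h ▸ hylt)), hmc] at this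
              · intro y hy hc
                have hyM : y ∈ List.replicate rc rv ++ x :: S' := by simp [hy]
                have hylt : rv < y := hrvnot y hy
                apply htie y hyM
                rwa [hcount y (fun h => lt_irrefl rv (h ▸ hylt)), hmc]
        · -- discard the pending run
          obtain ⟨ih1, ih2⟩ := ih b bc x 1 hpw' hxS'
          rw [hM1] at ih1 ih2
          constructor
          · intro H
            simp only [List.foldl_cons, hstep, if_neg hrcbc]
            apply ih1
            intro y hy
            have hyM : y ∈ List.replicate rc rv ++ x :: S' := by simp [hy]
            have hylt : rv < y := hrvnot y hy
            have := H y hyM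
            rwa [hcount y (fun h => lt_irrefl rv (h ▸ hylt))] at this
          · intro m hm hgt hmax htie
            simp only [List.foldl_cons, hstep, if_neg hrcbc]
            have hmrv : m ≠ rv := by
              intro h
              rw [h, hcountrv] at hgt
              omega
            have hmtail : m ∈ x :: S' := by
              rcases List.mem_append.1 hm with h | h
              · exact absurd (List.eq_of_mem_replicate h) hmrv
              · exact h
            have hmc : (List.replicate rc rv ++ x :: S').count m = (x :: S').count m :=
              hcount m hmrv
            apply ih2 m hmtail
            · rwa [hmc] at hgt
            · intro y hy
              have hyM : y ∈ List.replicate rc rv ++ x :: S' := by simp [hy]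
              have hylt : rv < y := hrvnot y hy
              have := hmax y hyM
              rwa [hcount y (fun h => lt_irrefl rv (h ▸ hylt)), hmc] at this
            · intro y hy hc
              have hyM : y ∈ List.replicate rc rv ++ x :: S' := by simp [hy]
              have hylt : rv < y := hrvnot y hy
              apply htie y hyM
              rwa [hcount y (fun h => lt_irrefl rv (h ▸ hylt)), hmc]

-- A's core returns the smallest value of maximal count in L
theorem pv_A_char (L : List String) (hL : L ≠ []) :
    ∃ c, (match PySem.List.max? (PySem.Dict.counter L).values (fun v => v) with
          | none => (none : Option String)
          | some maior =>
            match PySem.List.sorted (((PySem.Dict.counter L).items.filter (fun p => p.2 == maior)).map (·.1)) (fun k => k) false with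
            | [] => none
            | c :: _ => some c) = some c ∧
      c ∈ L ∧ (∀ y ∈ L, (L.count y : Int) ≤ (L.count c : Int)) ∧
      (∀ y ∈ L, (L.count y : Int) = (L.count c : Int) → c ≤ y) := by
  classical
  have hitems : (PySem.Dict.counter L).items
      = (PySem.Set.ofList L).map (fun k => (k, (L.count k : Int))) := PySem.Dict.items_counter L
  have hvalues : (PySem.Dict.counter L).values
      = (PySem.Set.ofList L).map (fun k => ((L.count k : Int))) := by
    simp [PySem.Dict.values, hitems]
  obtain ⟨x, hx⟩ := List.exists_mem_of_ne_nil L hL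
  have hxS : x ∈ PySem.Set.ofList L := (PySem.Set.mem_ofList _ _).2 hx
  have hvne : (PySem.Dict.counter L).values ≠ [] := by
    rw [hvalues]
    intro h
    rw [List.map_eq_nil_iff] at h
    rw [h] at hxS
    simp at hxS
  obtain ⟨maior, hmaior⟩ : ∃ maior, PySem.List.max? (PySem.Dict.counter L).values (fun v => v) = some maior := by
    cases h : PySem.List.max? (PySem.Dict.counter L).values (fun v => v) with
    | none => exact absurd ((PySem.List.max?_eq_none_iff _ _).1 h) hvne
    | some maior => exact ⟨maior, rfl⟩
  have hmax : ∀ v ∈ (PySem.Dict.counter L).values, v ≤ maior := by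
    have := PySem.List.max?_isMax hmaior; simpa using this
  have hmem : maior ∈ (PySem.Dict.counter L).values := PySem.List.max?_mem hmaior
  have hcand : ((PySem.Dict.counter L).items.filter (fun p => p.2 == maior)).map (·.1)
      = (PySem.Set.ofList L).filter (fun k => (L.count k : Int) == maior) := by
    rw [hitems, List.filter_map, List.map_map]
    simp [Function.comp_def]
  obtain ⟨k1, hk1S, hk1c⟩ : ∃ k1, k1 ∈ PySem.Set.ofList L ∧ ((L.count k1 : Int)) = maior := by
    rw [hvalues] at hmem
    obtain ⟨k1, hk1, hceq⟩ := List.mem_map.1 hmem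
    exact ⟨k1, hk1, hceq⟩
  have hcne : (PySem.Set.ofList L).filter (fun k => (L.count k : Int) == maior) ≠ [] := by
    intro h
    have : k1 ∈ (PySem.Set.ofList L).filter (fun k => (L.count k : Int) == maior) :=
      List.mem_filter.2 ⟨hk1S, by simp [hk1c]⟩
    rw [h] at this; simp at this
  obtain ⟨c, t, hsorted⟩ : ∃ c t,
      PySem.List.sorted (((PySem.Dict.counter L).items.filter (fun p => p.2 == maior)).map (·.1)) (fun k => k) false = c :: t := by
    cases h : PySem.List.sorted (((PySem.Dict.counter L).items.filter (fun p => p.2 == maior)).map (·.1)) (fun k => k) false with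
    | nil =>
        exfalso
        have := (PySem.List.sorted_eq_nil_iff _ _ _).1 h
        rw [hcand] at this
        exact hcne this
    | cons c t => exact ⟨c, t, rfl⟩
  have hchead : ∀ y ∈ (PySem.Set.ofList L).filter (fun k => (L.count k : Int) == maior), c ≤ y := by
    have := PySem.List.key_head_sorted_le (key := fun k => (k : String)) (h := hsorted)
    intro y hy
    exact this y (by rwa [hcand])
  have hcmem : c ∈ (PySem.Set.ofList L).filter (fun k => (L.count k : Int) == maior) := by
    have : c ∈ PySem.List.sorted (((PySem.Dict.counter L).items.filter (fun p => p.2 == maior)).map (·.1)) (fun k => k) false := by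
      rw [hsorted]; exact List.mem_cons_self
    rw [PySem.List.mem_sorted, hcand] at this
    exact this
  have hcS : c ∈ PySem.Set.ofList L := (List.mem_filter.1 hcmem).1
  have hcc : ((L.count c : Int)) = maior := by
    have := (List.mem_filter.1 hcmem).2; simpa using this
  refine ⟨c, ?_, (PySem.Set.mem_ofList _ _).1 hcS, ?_, ?_⟩
  · rw [hmaior]
    show (match PySem.List.sorted (((PySem.Dict.counter L).items.filter (fun p => p.2 == maior)).map (·.1)) (fun k => k) false with
          | [] => (none : Option String)
          | c :: _ => some c) = some c
    rw [hsorted]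
  · intro y hy
    have hyv : ((L.count y : Int)) ∈ (PySem.Dict.counter L).values := by
      rw [hvalues]
      exact List.mem_map.2 ⟨y, (PySem.Set.mem_ofList _ _).2 hy, rfl⟩
    rw [hcc]
    exact hmax _ hyv
  · intro y hy hcy
    apply hchead
    exact List.mem_filter.2 ⟨(PySem.Set.mem_ofList _ _).2 hy, by simp [hcy, hcc]⟩

-- ===== VERDICT (by name: the statement is the Claim_ definition above) =====
theorem moda_texto_py_spec : Claim_equal_moda_texto_py := by
  intro lista _
  unfold Spec_moda_texto_py moda_texto_py moda_texto_py_alt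
  match lista with
  | none => rfl
  | some l =>
    by_cases hl : l = []
    · simp [hl]
    · simp only [if_neg hl]
      by_cases hlim : pvLimpos l = []
      · simp [hlim]
      · simp only [if_neg hlim]
        obtain ⟨c, hA, hcL, hcall, hctie⟩ := pv_A_char (pvLimpos l) hlim
        rw [hA]
        obtain ⟨s0, t, hs⟩ : ∃ s0 t,
            PySem.List.sorted (pvLimpos l) (fun k => k) false = s0 :: t := by
          cases h : PySem.List.sorted (pvLimpos l) (fun k => k) false with
          | nil => exact absurd ((PySem.List.sorted_eq_nil_iff _ _ _).1 h) hlim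
          | cons s0 t => exact ⟨s0, t, rfl⟩
        rw [hs]
        have hperm : (s0 :: t).Perm (pvLimpos l) := hs ▸ PySem.List.sorted_perm _ _ _
        have hcnt : ∀ y, (s0 :: t).count y = (pvLimpos l).count y :=
          fun y => hperm.count_eq y
        have hmemS : ∀ y, y ∈ (s0 :: t) ↔ y ∈ pvLimpos l := fun y => hperm.mem_iff
        have hpw : (s0 :: t).Pairwise (· ≤ ·) := by
          have := PySem.List.sorted_pairwise (xs := pvLimpos l) (key := fun k => k)
          rwa [hs] at this
        have hge : ∀ x ∈ (s0 :: t), s0 ≤ x := by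
          intro x hx
          have hhead := PySem.List.key_head_sorted_le (key := fun k => (k : String)) (h := hs)
          exact hhead x ((hmemS x).1 hx)
        obtain ⟨_, part2⟩ := pv_scan (s0 :: t) none 0 s0 0 hpw hge
        simp only [List.replicate, List.nil_append] at part2
        symm
        show pvFlush ((s0 :: t).foldl pvStep (none, 0, s0, 0)) = some c
        apply part2 c ((hmemS c).2 hcL)
        · rw [hcnt]
          exact List.count_pos_iff.2 hcL
        · intro y hy
          rw [hcnt, hcnt]
          exact_mod_cast hcall y ((hmemS y).1 hy)
        · intro y hy hc
          apply hctie y ((hmemS y).1 hy)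
          rw [hcnt, hcnt] at hc
          exact_mod_cast hc
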